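-- pv_equiv track=rewrite | github.com/pypi-data/pypi-mirror-191 | packages/t5html/t5html-23.6.2.tar.gz/t5html-23.6.2/src/t5html/elementparser.py | attributesStructure_fromString
-- ===== SOURCE A (Python) =====
-- def attributesStructure_fromString(attribute_str):
--     """
--     takes a string of attributes and
--     returns a list of attribute-tuples
--     """
--     # There are three possible 'words':
--     #   1. standalone attributes (aka bool. attr), 2a. simple assignments (key=value),
--     #   2b. text assignments (key="quoted longer text")
--
--     words = attribute_str.split()
--     next_word_belongs_to_last_value = False
--     attributes = []
--
--     for word in words:
--
--         if next_word_belongs_to_last_value: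
--
--             # remove last (key, value) pair and add current word to value
--             # reappend and get next word
--
--             (key, value) = attributes.pop()
--             if word.endswith('"'):
--                 next_word_belongs_to_last_value = False
--             value += ' ' + word.strip('"')
--             attr = (key, value)
--
--             attributes.append(attr)
--             continue
--
--         is_assignment = '=' in word
--         if is_assignment:
--             key, value = word.split('=', 1)
--             if value.startswith('"') and not value.endswith('"'):
--                 next_word_belongs_to_last_value = True
--             attr = key, value.strip('"')
--         else:
--             # boolean attribute
--             attr = (None, word)
--
--         attributes.append(attr)
--
--     return attributes
-- ===== SOURCE B (Python) =====
-- def attributesStructure_fromString(attribute_str):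
--     """
--     takes a string of attributes and
--     returns a list of attribute-tuples
--     """
--     words = attribute_str.split()
--     attributes = []
--     i, n = 0, len(words)
--     while i < n:
--         word = words[i]
--         i += 1
--         if '=' in word:
--             key, value = word.split('=', 1)
--             if value.startswith('"') and not value.endswith('"'):
--                 # quoted multi-word value: consume words until one ends with '"'
--                 parts = [value.strip('"')]
--                 while i < n:
--                     nxt = words[i]
--                     i += 1
--                     parts.append(nxt.strip('"'))
--                     if nxt.endswith('"'):
--                         break
--                 attributes.append((key, ' '.join(parts)))
--             else:
--                 attributes.append((key, value.strip('"')))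
--         else:
--             attributes.append((None, word))
--     return attributes
-- ===== Notes on version B (the rewrite author's own statement) =====
-- stated objective: simpler
-- what changed: Replaces A's flag-plus-pop()/re-append state machine with a nested consumer loop: on an opening quoted value B collects the following words into a parts buffer until the closing word and emits the joined tuple once, so the finished list is only ever appended to.
import Mathlib
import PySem

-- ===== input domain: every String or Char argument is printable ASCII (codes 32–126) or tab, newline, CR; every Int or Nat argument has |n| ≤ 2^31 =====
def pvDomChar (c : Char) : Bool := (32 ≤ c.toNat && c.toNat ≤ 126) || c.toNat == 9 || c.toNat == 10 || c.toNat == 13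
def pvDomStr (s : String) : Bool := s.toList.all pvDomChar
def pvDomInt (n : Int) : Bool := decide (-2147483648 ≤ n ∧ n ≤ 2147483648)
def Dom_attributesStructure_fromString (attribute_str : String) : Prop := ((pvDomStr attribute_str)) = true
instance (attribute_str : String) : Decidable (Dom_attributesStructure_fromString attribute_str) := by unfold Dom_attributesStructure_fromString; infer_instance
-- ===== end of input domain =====

-- B replaces A's flag-driven pop()/re-append accumulation with a nested consumer loop that
-- joins the quoted words in one go (objective: simpler; same return value everywhere).

-- ===== PORT A =====
-- loop body of A's 'for word in words', state = (next_word_belongs_to_last_value, attributes);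
-- strings are handled on List Char via PySem.Chars (exact on the stated ASCII domain)
def pvA_step (st : Bool × List (Option (List Char) × List Char)) (word : List Char) :
    Bool × List (Option (List Char) × List Char) :=
  let flag := st.1
  let attributes := st.2
  if flag then
    match PySem.List.pop? attributes with
    | some ((key, value), rest) =>
        -- flag cleared when the word ends with '"'
        let flag' := !(PySem.Chars.endswith word ['"'])
        let value' := value ++ [' '] ++ PySem.Chars.stripChars word ['"']
        (flag', rest ++ [(key, value')])
    | none => st        -- unreachable: Python's pop() would raise IndexError here
  else
    if PySem.Chars.isIn ['='] word then
      match PySem.Chars.splitOnMax word ['='] 1 with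
      | [key, value] =>
          let flag' := PySem.Chars.startswith value ['"'] && !(PySem.Chars.endswith value ['"'])
          (flag', attributes ++ [(some key, PySem.Chars.stripChars value ['"'])])
      | _ => st         -- unreachable: '=' ∈ word gives exactly two pieces
    else
      (flag, attributes ++ [(none, word)])

def attributesStructure_fromString (attribute_str : String) : List (Option String × String) :=
  (((PySem.Chars.split₀ attribute_str.toList).foldl pvA_step (false, [])).2).map
    (fun kv => (kv.1.map String.ofList, String.ofList kv.2))

-- ===== PORT B =====
-- inner 'while' of Source B: consume words into parts until one ends with '"'; returns (parts, remaining words)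
def pvB_collect (parts : List (List Char)) : List (List Char) → List (List Char) × List (List Char)
  | [] => (parts, [])
  | w :: ws =>
      let parts' := parts ++ [PySem.Chars.stripChars w ['"']]
      if PySem.Chars.endswith w ['"'] then (parts', ws) else pvB_collect parts' ws

-- termination fact for pvB_go: the consumer never grows the remaining word list
theorem pvB_collect_len (parts : List (List Char)) (ws : List (List Char)) :
    (pvB_collect parts ws).2.length ≤ ws.length := by
  induction ws generalizing parts with
  | nil => simp [pvB_collect]
  | cons w ws ih =>
      rw [pvB_collect]
      by_cases h : PySem.Chars.endswith w ['"'] = true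
      · simp [h]
      · simp only [h, Bool.false_eq_true, if_false]
        exact le_trans (ih _) (by simp)

-- outer 'while' of Source B over the remaining words
def pvB_go : List (List Char) → List (Option (List Char) × List Char)
  | [] => []
  | w :: ws =>
      if PySem.Chars.isIn ['='] w then
        match PySem.Chars.splitOnMax w ['='] 1 with
        | [key, value] =>
            if PySem.Chars.startswith value ['"'] && !(PySem.Chars.endswith value ['"']) then
              (some key,
                PySem.Chars.join [' '] (pvB_collect [PySem.Chars.stripChars value ['"']] ws).1) ::
                pvB_go (pvB_collect [PySem.Chars.stripChars value ['"']] ws).2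
            else
              (some key, PySem.Chars.stripChars value ['"']) :: pvB_go ws
        | _ => pvB_go ws  -- unreachable: '=' ∈ w gives exactly two pieces
      else
        (none, w) :: pvB_go ws
termination_by ws => ws.length
decreasing_by
  · exact Nat.lt_succ_of_le (pvB_collect_len _ _)
  · simp
  · simp

def attributesStructure_fromString_alt (attribute_str : String) : List (Option String × String) :=
  (pvB_go (PySem.Chars.split₀ attribute_str.toList)).map
    (fun kv => (kv.1.map String.ofList, String.ofList kv.2))

-- ===== PRECONDITION & SPEC =====
def Spec_attributesStructure_fromString (attribute_str : String) (out : List (Option String × String)) : Prop := out = attributesStructure_fromString_alt attribute_str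
instance (attribute_str : String) (out : List (Option String × String)) : Decidable (Spec_attributesStructure_fromString attribute_str out) := by unfold Spec_attributesStructure_fromString; infer_instance

-- ===== CLAIM (what is proved, stated in full; the proofs are below) =====
def Claim_equal_attributesStructure_fromString : Prop := ∀ (attribute_str : String), Dom_attributesStructure_fromString attribute_str → Spec_attributesStructure_fromString attribute_str (attributesStructure_fromString attribute_str)

-- ===== LEMMAS AND PROOFS =====

-- ' '.join(ps + [x]) = ' '.join(ps) + ' ' + x for nonempty ps
theorem pv_join_append_singleton (ps : List (List Char)) (x : List Char) (h : ps ≠ []) :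
    PySem.Chars.join [' '] (ps ++ [x]) = PySem.Chars.join [' '] ps ++ [' '] ++ x := by
  induction ps with
  | nil => exact absurd rfl h
  | cons p ps ih =>
      cases ps with
      | nil => simp [PySem.Chars.join_cons_cons, PySem.Chars.join_singleton]
      | cons q qs =>
          simp only [List.cons_append]
          have ih' := ih (by simp)
          simp only [List.cons_append] at ih'
          rw [PySem.Chars.join_cons_cons, PySem.Chars.join_cons_cons, ih']
          simp

-- the main invariant, both flag states at once, by strong induction on the word count
theorem pv_main (n : Nat) : ∀ (ws : List (List Char)), ws.length ≤ n →
    (∀ acc, (ws.foldl pvA_step (false, acc)).2 = acc ++ pvB_go ws) ∧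
    (∀ acc (k : Option (List Char)) parts, parts ≠ [] →
      (ws.foldl pvA_step (true, acc ++ [(k, PySem.Chars.join [' '] parts)])).2 =
        acc ++ (k, PySem.Chars.join [' '] (pvB_collect parts ws).1) ::
          pvB_go (pvB_collect parts ws).2) := by
  induction n with
  | zero =>
      intro ws hws
      have : ws = [] := List.eq_nil_of_length_eq_zero (Nat.le_zero.mp hws)
      subst this
      refine ⟨fun acc => by rw [pvB_go.eq_def]; simp,
              fun acc k parts hp => by rw [pvB_go.eq_def]; simp [pvB_collect]⟩
  | succ n ih =>
      intro ws hws
      cases ws with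
      | nil =>
          refine ⟨fun acc => by rw [pvB_go.eq_def]; simp,
                  fun acc k parts hp => by rw [pvB_go.eq_def]; simp [pvB_collect]⟩
      | cons w ws =>
          have hws' : ws.length ≤ n := Nat.lt_succ_iff.mp (by simpa using hws)
          constructor
          · intro acc
            rw [List.foldl_cons]
            show ((ws.foldl pvA_step (pvA_step (false, acc) w))).2 = acc ++ pvB_go (w :: ws)
            rw [pvB_go.eq_def]
            by_cases he : PySem.Chars.isIn ['='] w = true
            · rcases hsp : PySem.Chars.splitOnMax w ['='] 1 with _ | ⟨key, _ | ⟨value, rest⟩⟩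
              · -- fallback case: both sides skip the word
                simp only [pvA_step, he, if_true, hsp]
                exact (ih ws hws').1 acc
              · simp only [pvA_step, he, if_true, hsp]
                exact (ih ws hws').1 acc
              · cases rest with
                | nil =>
                    simp only [pvA_step, he, if_true, hsp]
                    by_cases hq : (PySem.Chars.startswith value ['"'] &&
                        !(PySem.Chars.endswith value ['"'])) = true
                    · simp only [hq, if_true]
                      have := (ih ws hws').2 acc (some key)
                        [PySem.Chars.stripChars value ['"']] (by simp)
                      rw [PySem.Chars.join_singleton] at this
                      exact this
                    · simp only [hq, Bool.false_eq_true, if_false]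
                      rw [(ih ws hws').1 (acc ++ [(some key, PySem.Chars.stripChars value ['"'])])]
                      simp
                | cons z zs =>
                    simp only [pvA_step, he, if_true, hsp]
                    exact (ih ws hws').1 acc
            · simp only [Bool.not_eq_true] at he
              simp only [pvA_step, he, Bool.false_eq_true, if_false]
              rw [(ih ws hws').1 (acc ++ [(none, w)])]
              simp
          · intro acc k parts hp
            rw [List.foldl_cons]
            have hpop : PySem.List.pop? (acc ++ [(k, PySem.Chars.join [' '] parts)]) =
                some ((k, PySem.Chars.join [' '] parts), acc) := PySem.List.pop?_last _ _
            show ((ws.foldl pvA_step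
              (pvA_step (true, acc ++ [(k, PySem.Chars.join [' '] parts)]) w))).2 = _
            simp only [pvA_step, if_true, hpop]
            rw [pvB_collect]
            by_cases hend : PySem.Chars.endswith w ['"'] = true
            · simp only [hend, Bool.not_true, if_true]
              rw [(ih ws hws').1
                (acc ++ [(k, PySem.Chars.join [' '] parts ++ [' '] ++
                  PySem.Chars.stripChars w ['"'])])]
              rw [← pv_join_append_singleton parts _ hp]
              simp
            · simp only [hend, Bool.not_false, Bool.false_eq_true, if_false]
              have := (ih ws hws').2 acc k (parts ++ [PySem.Chars.stripChars w ['"']]) (by simp)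
              rw [pv_join_append_singleton parts _ hp] at this
              exact this

-- ===== VERDICT (by name: the statement is the Claim_ definition above) =====
theorem attributesStructure_fromString_spec : Claim_equal_attributesStructure_fromString := by
  intro s _
  unfold Spec_attributesStructure_fromString
  unfold attributesStructure_fromString attributesStructure_fromString_alt
  have h := (pv_main (PySem.Chars.split₀ s.toList).length
      (PySem.Chars.split₀ s.toList) le_rfl).1 []
  simp only [List.nil_append] at h
  rw [h]
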